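-- pv_equiv track=rewrite | github.com/chaitanya2444/figma2pdf | backend/services/figma_service_hf.py | infer_app_type
-- ===== SOURCE A (Python) =====
-- def infer_app_type(url):
--     """Smart app type detection from URL"""
--     url_lower = url.lower()
--     if any(word in url_lower for word in ['ecommerce', 'shop', 'store', 'cart']):
--         return "E-commerce"
--     elif any(word in url_lower for word in ['bank', 'finance', 'payment', 'wallet']):
--         return "Fintech"
--     elif any(word in url_lower for word in ['social', 'chat', 'message', 'feed']):
--         return "Social Media"
--     elif any(word in url_lower for word in ['food', 'delivery', 'restaurant']):
--         return "Food Delivery"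
--     elif any(word in url_lower for word in ['health', 'medical', 'doctor']):
--         return "Healthcare"
--     else:
--         return "Business"
-- ===== SOURCE B (Python) =====
-- KEYWORD_PRIORITY = {
--     'ecommerce': 0, 'shop': 0, 'store': 0, 'cart': 0,
--     'bank': 1, 'finance': 1, 'payment': 1, 'wallet': 1,
--     'social': 2, 'chat': 2, 'message': 2, 'feed': 2,
--     'food': 3, 'delivery': 3, 'restaurant': 3,
--     'health': 4, 'medical': 4, 'doctor': 4,
-- }
-- LABELS = ["E-commerce", "Fintech", "Social Media", "Food Delivery", "Healthcare", "Business"]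
--
--
-- def infer_app_type(url):
--     """Smart app type detection from URL: aggregate all matching keywords and
--     take the best (minimum) category priority; 5 = Business when none match."""
--     u = url.lower()
--     best = min((p for kw, p in KEYWORD_PRIORITY.items() if kw in u), default=5)
--     return LABELS[best]
-- ===== Notes on version B (the rewrite author's own statement) =====
-- stated objective: alternative
-- what changed: Replaces the ordered five-branch elif chain by a flat keyword-to-priority map: B collects the priorities of ALL keywords occurring in the lowered url, takes their minimum (default 5), and indexes a label table; first-matching-rule equals minimum rule index.
import Mathlib
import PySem

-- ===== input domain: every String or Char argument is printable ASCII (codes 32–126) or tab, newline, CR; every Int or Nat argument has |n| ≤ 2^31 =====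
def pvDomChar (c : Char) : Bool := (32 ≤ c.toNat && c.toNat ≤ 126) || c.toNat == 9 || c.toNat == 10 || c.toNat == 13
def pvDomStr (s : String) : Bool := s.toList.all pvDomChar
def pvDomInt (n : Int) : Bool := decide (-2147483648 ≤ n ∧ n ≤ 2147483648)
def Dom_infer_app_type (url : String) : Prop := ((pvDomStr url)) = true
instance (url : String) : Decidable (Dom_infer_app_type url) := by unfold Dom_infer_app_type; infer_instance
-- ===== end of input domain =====

-- B replaces A's ordered elif chain by a flat keyword→priority map, aggregating the MINIMUM priority of all matching keywords and indexing a label table (alternative algorithm, same cost).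
-- ===== PORT A =====
def infer_app_type (url : String) : String :=
  let url_lower := PySem.Str.lower url
  if (["ecommerce", "shop", "store", "cart"].any (fun word => PySem.Str.isIn word url_lower)) then
    "E-commerce"
  else if (["bank", "finance", "payment", "wallet"].any (fun word => PySem.Str.isIn word url_lower)) then
    "Fintech"
  else if (["social", "chat", "message", "feed"].any (fun word => PySem.Str.isIn word url_lower)) then
    "Social Media"
  else if (["food", "delivery", "restaurant"].any (fun word => PySem.Str.isIn word url_lower)) then
    "Food Delivery"
  else if (["health", "medical", "doctor"].any (fun word => PySem.Str.isIn word url_lower)) then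
    "Healthcare"
  else
    "Business"

-- ===== PORT B =====
def pvKeywordPriority : List (String × Nat) :=
  [ ("ecommerce", 0), ("shop", 0), ("store", 0), ("cart", 0),
    ("bank", 1), ("finance", 1), ("payment", 1), ("wallet", 1),
    ("social", 2), ("chat", 2), ("message", 2), ("feed", 2),
    ("food", 3), ("delivery", 3), ("restaurant", 3),
    ("health", 4), ("medical", 4), ("doctor", 4) ]

def pvLabels : List String :=
  ["E-commerce", "Fintech", "Social Media", "Food Delivery", "Healthcare", "Business"]

-- min over the matched priorities with default 5, ported as a fold (all priorities are < 5)
def infer_app_type_alt (url : String) : String :=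
  let u := PySem.Str.lower url
  let best :=
    ((pvKeywordPriority.filter (fun kp => PySem.Str.isIn kp.1 u)).map (fun kp => kp.2)).foldl
      min 5
  pvLabels.getD best "Business"

-- ===== PRECONDITION & SPEC =====
def Spec_infer_app_type (url : String) (out : String) : Prop := out = infer_app_type_alt url
instance (url : String) (out : String) : Decidable (Spec_infer_app_type url out) := by unfold Spec_infer_app_type; infer_instance

-- ===== CLAIM (what is proved, stated in full; the proofs are below) =====
def Claim_equal_infer_app_type : Prop := ∀ (url : String), Dom_infer_app_type url → Spec_infer_app_type url (infer_app_type url)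

-- ===== LEMMAS AND PROOFS =====

-- min-fold over one constant-priority keyword group: matched iff any keyword occurs
theorem pvGrp (kws : List String) (p a : Nat) (u : String) :
    ((((kws.map (fun k => (k, p))).filter (fun kp => PySem.Str.isIn kp.1 u)).map
        (fun kp => kp.2)).foldl min a)
    = if kws.any (fun word => PySem.Str.isIn word u) then min a p else a := by
  induction kws generalizing a with
  | nil => simp
  | cons k ks ih =>
      by_cases h : PySem.Str.isIn k u = true
      · simp only [List.map_cons, List.filter_cons, List.any_cons, h, Bool.true_or, if_true,
          List.foldl_cons, ih]
        cases hb : ks.any (fun word => PySem.Str.isIn word u) <;> simp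
      · simp only [List.map_cons, List.filter_cons, List.any_cons, h, Bool.false_or,
          Bool.false_eq_true, if_false, ih]

-- the keyword table is the concatenation of the five rule groups
theorem pvKeywordPriority_eq :
    pvKeywordPriority
    = (["ecommerce", "shop", "store", "cart"].map (fun k => (k, 0)))
      ++ (["bank", "finance", "payment", "wallet"].map (fun k => (k, 1)))
      ++ (["social", "chat", "message", "feed"].map (fun k => (k, 2)))
      ++ (["food", "delivery", "restaurant"].map (fun k => (k, 3)))
      ++ (["health", "medical", "doctor"].map (fun k => (k, 4))) := by
  rfl

-- ===== VERDICT (by name: the statement is the Claim_ definition above) =====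
theorem infer_app_type_spec : Claim_equal_infer_app_type := by
  intro url _
  simp only [Spec_infer_app_type, infer_app_type, infer_app_type_alt, pvKeywordPriority_eq,
    List.filter_append, List.map_append, List.foldl_append, pvGrp]
  split_ifs <;> rfl
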